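-- pv_equiv track=rewrite | github.com/VimalMinsariya/euler-project | 30/36.py | makePalindromeBase2
-- ===== SOURCE A (Python) =====
-- def makePalindromeBase2(n,oddlength):
--     result = n
--     if oddlength:
--         n = n >> 1
--     while n>0:
--         result = (result << 1) + (n & 1)
--         n = n >> 1
--     return result
-- ===== SOURCE B (Python) =====
-- def makePalindromeBase2(n, oddlength):
--     if n <= 0:
--         return n
--     bits = bin(n)[2:]
--     head = bits[:-1] if oddlength else bits
--     return int(bits + head[::-1], 2)
-- ===== Notes on version B (the rewrite author's own statement) =====
-- stated objective: idiomatic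
-- what changed: Replaces the bit-shifting accumulator while-loop with a string-level construction: take bin(n), reverse-and-concatenate (dropping the middle bit when oddlength) and parse the palindrome back with int(.,2).
import Mathlib
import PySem

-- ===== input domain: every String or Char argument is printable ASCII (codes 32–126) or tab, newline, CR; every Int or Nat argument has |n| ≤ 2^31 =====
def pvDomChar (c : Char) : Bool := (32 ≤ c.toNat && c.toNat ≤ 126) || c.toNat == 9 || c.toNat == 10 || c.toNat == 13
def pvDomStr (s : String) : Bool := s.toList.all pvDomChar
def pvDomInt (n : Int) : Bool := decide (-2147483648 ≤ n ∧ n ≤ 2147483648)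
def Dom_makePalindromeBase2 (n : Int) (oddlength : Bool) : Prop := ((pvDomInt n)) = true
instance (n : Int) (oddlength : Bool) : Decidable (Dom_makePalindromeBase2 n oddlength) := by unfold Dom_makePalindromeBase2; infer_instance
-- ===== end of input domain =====

-- B rebuilds the palindrome on the binary-digit string of n instead of A's bit-shifting
-- accumulator loop (objective: idiomatic); equal return values are proved on all of Dom.

-- ===== PORT A =====

-- n >> 1 for a positive n is division by two (used by the loop and its termination)
theorem pvShiftR1_cast (m : Nat) : ((m : Nat) : Int) >>> (1 : Nat) = ((m / 2 : Nat) : Int) := by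
  rw [← Int.natCast_shiftRight, Nat.shiftRight_eq_div_pow]

theorem pvShiftR1_pos (n : Int) (h : 0 < n) : n >>> (1 : Nat) = ((n.toNat / 2 : Nat) : Int) := by
  have hn : n = ((n.toNat : Nat) : Int) := by omega
  calc n >>> (1 : Nat) = ((n.toNat : Nat) : Int) >>> (1 : Nat) := by rw [← hn]
    _ = ((n.toNat / 2 : Nat) : Int) := pvShiftR1_cast n.toNat

-- the 'while n > 0' loop of A, carried state (result, n)
def pvLoopA (result n : Int) : Int :=
  if h : 0 < n then
    pvLoopA ((result <<< (1 : Nat)) + PySem.Int.band n 1) (n >>> (1 : Nat))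
  else result
termination_by n.toNat
decreasing_by
  rw [pvShiftR1_pos n h]; omega

def makePalindromeBase2 (n : Int) (oddlength : Bool) : Int :=
  -- result = n; if oddlength: n = n >> 1; while n > 0: …
  pvLoopA n (if oddlength then n >>> (1 : Nat) else n)

-- ===== PORT B =====

-- bin(m)[2:] for m ≥ 0 (standard binary string, most significant bit first; '' for 0)
def pvBinChars (m : Nat) : List Char :=
  if m = 0 then []
  else pvBinChars (m / 2) ++ [if m % 2 = 1 then '1' else '0']
decreasing_by
  exact Nat.div_lt_self (Nat.pos_of_ne_zero (by assumption)) (by norm_num)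

-- int(s, 2) on a string of '0'/'1' characters
def pvParseBin (l : List Char) : Int :=
  l.foldl (fun a c => 2 * a + (if c = '1' then 1 else 0)) 0

def makePalindromeBase2_alt (n : Int) (oddlength : Bool) : Int :=
  if n ≤ 0 then n
  else
    let bits := pvBinChars n.toNat
    -- bits[:-1] on the nonempty string bits = dropLast; head[::-1] = reverse (both exact here)
    let head := if oddlength then bits.dropLast else bits
    pvParseBin (bits ++ head.reverse)

-- ===== PRECONDITION & SPEC =====
def Spec_makePalindromeBase2 (n : Int) (oddlength : Bool) (out : Int) : Prop := out = makePalindromeBase2_alt n oddlength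
instance (n : Int) (oddlength : Bool) (out : Int) : Decidable (Spec_makePalindromeBase2 n oddlength out) := by unfold Spec_makePalindromeBase2; infer_instance

-- ===== CLAIM (what is proved, stated in full; the proofs are below) =====
def Claim_equal_makePalindromeBase2 : Prop := ∀ (n : Int) (oddlength : Bool), Dom_makePalindromeBase2 n oddlength → Spec_makePalindromeBase2 n oddlength (makePalindromeBase2 n oddlength)

-- ===== LEMMAS AND PROOFS =====

-- proof-side characterisations: bit length and reversed-bit value of a natural number
def pvL (m : Nat) : Nat :=
  if m = 0 then 0 else pvL (m / 2) + 1
decreasing_by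
  exact Nat.div_lt_self (Nat.pos_of_ne_zero (by assumption)) (by norm_num)

def pvR (m : Nat) : Nat :=
  if m = 0 then 0 else m % 2 * 2 ^ pvL (m / 2) + pvR (m / 2)
decreasing_by
  exact Nat.div_lt_self (Nat.pos_of_ne_zero (by assumption)) (by norm_num)

theorem pvLoopA_nonpos (r n : Int) (h : ¬ 0 < n) : pvLoopA r n = r := by
  rw [pvLoopA]; simp [h]

theorem pvBand_one (m : Nat) : PySem.Int.band ((m : Nat) : Int) 1 = ((m % 2 : Nat) : Int) := by
  have : ((1 : Nat) : Int) = (1 : Int) := by norm_num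
  rw [← this, PySem.Int.band_natCast, Nat.and_one_is_mod]

theorem pvLoopA_eq (m : Nat) : ∀ (r : Int),
    pvLoopA r ((m : Nat) : Int) = r * 2 ^ pvL m + ((pvR m : Nat) : Int) := by
  induction m using Nat.strong_induction_on with
  | _ m ih =>
    intro r
    by_cases hm : m = 0
    · subst hm
      rw [show ((0 : Nat) : Int) = 0 by norm_num, pvLoopA_nonpos r 0 (by omega), pvL, pvR]; simp
    · have hpos : 0 < ((m : Nat) : Int) := by omega
      rw [pvLoopA]
      simp only [hpos, dite_true]
      rw [pvShiftR1_pos _ hpos, pvBand_one]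
      have hto : ((m : Nat) : Int).toNat = m := by omega
      rw [hto]
      rw [ih (m / 2) (Nat.div_lt_self (Nat.pos_of_ne_zero hm) (by norm_num))]
      conv_rhs => rw [pvL, pvR]
      rw [if_neg hm, if_neg hm]
      have hsl : r <<< (1 : Nat) = r * 2 := by
        rw [Int.shiftLeft_eq]; norm_num
      rw [hsl]
      push_cast
      ring

-- accumulator form of pvParseBin
def pvPAcc (a : Int) (l : List Char) : Int :=
  l.foldl (fun a c => 2 * a + (if c = '1' then 1 else 0)) a

theorem pvPAcc_append (a : Int) (l1 l2 : List Char) :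
    pvPAcc a (l1 ++ l2) = pvPAcc (pvPAcc a l1) l2 := by
  unfold pvPAcc; rw [List.foldl_append]

theorem pvPAcc_shift (l : List Char) : ∀ (a : Int),
    pvPAcc a l = a * 2 ^ l.length + pvPAcc 0 l := by
  induction l with
  | nil => intro a; simp [pvPAcc]
  | cons c l ih =>
    intro a
    show pvPAcc (2 * a + _) l = _
    rw [ih (2 * a + (if c = '1' then 1 else 0))]
    conv_rhs => rw [show pvPAcc 0 (c :: l) = pvPAcc (2 * 0 + (if c = '1' then 1 else 0)) l from rfl]
    rw [ih (2 * 0 + (if c = '1' then 1 else 0))]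
    simp only [List.length_cons, pow_succ]
    split_ifs <;> ring

theorem pvParse_bin (m : Nat) : pvPAcc 0 (pvBinChars m) = ((m : Nat) : Int) := by
  induction m using Nat.strong_induction_on with
  | _ m ih =>
    by_cases hm : m = 0
    · subst hm; rw [pvBinChars]; simp [pvPAcc]
    · rw [pvBinChars]
      simp only [hm, if_false]
      rw [pvPAcc_append, ih (m / 2) (Nat.div_lt_self (Nat.pos_of_ne_zero hm) (by norm_num))]
      rcases Nat.mod_two_eq_zero_or_one m with h2 | h2 <;>
        simp [pvPAcc, h2] <;> omega

theorem pvLen_bin (m : Nat) : (pvBinChars m).length = pvL m := by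
  induction m using Nat.strong_induction_on with
  | _ m ih =>
    by_cases hm : m = 0
    · subst hm; rw [pvBinChars, pvL]; simp
    · rw [pvBinChars, pvL]
      simp only [hm, if_false, List.length_append, List.length_singleton]
      rw [ih (m / 2) (Nat.div_lt_self (Nat.pos_of_ne_zero hm) (by norm_num))]

theorem pvParse_rev (m : Nat) : pvPAcc 0 (pvBinChars m).reverse = ((pvR m : Nat) : Int) := by
  induction m using Nat.strong_induction_on with
  | _ m ih =>
    by_cases hm : m = 0
    · subst hm; rw [pvBinChars, pvR]; simp [pvPAcc]
    · have hlt := Nat.div_lt_self (Nat.pos_of_ne_zero hm) (show 1 < 2 by norm_num)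
      rw [pvBinChars]
      simp only [hm, if_false, List.reverse_append, List.reverse_singleton, List.singleton_append]
      have hstep : pvPAcc 0 ((if m % 2 = 1 then '1' else '0') :: (pvBinChars (m / 2)).reverse)
          = pvPAcc ((m % 2 : Nat) : Int) (pvBinChars (m / 2)).reverse := by
        rcases Nat.mod_two_eq_zero_or_one m with h2 | h2 <;> simp [pvPAcc, h2]
      rw [hstep, pvPAcc_shift, ih (m / 2) hlt, List.length_reverse, pvLen_bin]
      conv_rhs => rw [pvR]
      rw [if_neg hm]
      push_cast
      ring

theorem pvBin_dropLast (m : Nat) (hm : m ≠ 0) :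
    (pvBinChars m).dropLast = pvBinChars (m / 2) := by
  rw [pvBinChars]
  simp [hm]

theorem makePalindromeBase2_spec' (n : Int) (oddlength : Bool) :
    makePalindromeBase2 n oddlength = makePalindromeBase2_alt n oddlength := by
  unfold makePalindromeBase2 makePalindromeBase2_alt
  by_cases hn : n ≤ 0
  · simp only [hn, if_true]
    cases oddlength
    · simp [pvLoopA_nonpos n n (by omega)]
    · simp only [if_true]
      have h1 : n >>> (1 : Nat) ≤ 0 := by
        cases n with
        | ofNat m =>
          have hne : ((m : Nat) : Int) ≤ 0 := hn
          have hm : m = 0 := by omega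
          subst hm; decide
        | negSucc m =>
          show Int.negSucc (m >>> 1) ≤ 0
          exact le_of_lt (Int.negSucc_lt_zero _)
      exact pvLoopA_nonpos n _ (by omega)
  · have hpos : 0 < n := by omega
    obtain ⟨m, hmn⟩ : ∃ m : Nat, n = ((m : Nat) : Int) := ⟨n.toNat, by omega⟩
    have hm0 : m ≠ 0 := by omega
    subst hmn
    have hto : ((m : Nat) : Int).toNat = m := Int.toNat_natCast m
    rw [if_neg hn]
    cases oddlength
    · -- even total length: loop over all of n, mirror = reverse bits
      simp only [Bool.false_eq_true, if_false]
      rw [pvLoopA_eq m]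
      show _ = pvPAcc 0 (pvBinChars ((m : Nat) : Int).toNat
        ++ (pvBinChars ((m : Nat) : Int).toNat).reverse)
      rw [hto, pvPAcc_append, pvParse_bin, pvPAcc_shift, List.length_reverse, pvLen_bin,
        pvParse_rev]
    · -- odd total length: loop over n >> 1, mirror drops the middle bit
      simp only [if_true]
      rw [pvShiftR1_cast m, pvLoopA_eq (m / 2)]
      show _ = pvPAcc 0 (pvBinChars ((m : Nat) : Int).toNat
        ++ (pvBinChars ((m : Nat) : Int).toNat).dropLast.reverse)
      rw [hto, pvBin_dropLast m hm0, pvPAcc_append, pvParse_bin, pvPAcc_shift,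
        List.length_reverse, pvLen_bin, pvParse_rev]

-- ===== VERDICT (by name: the statement is the Claim_ definition above) =====
theorem makePalindromeBase2_spec : Claim_equal_makePalindromeBase2 := by
  intro n oddlength _
  exact makePalindromeBase2_spec' n oddlength
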